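-- pv_equiv track=rewrite | github.com/mtholder/taxalotl | taxalotl/silva.py | gen_all_namepaths
-- ===== SOURCE A (Python) =====
-- def gen_all_namepaths(path, name, prim_acc):
--     an = []
--     while path.endswith(';'):
--         path = path[:-1]
--     if name:
--         if '(' in name:
--             name = name.split('(')[0].strip()
--         an.append(((path, name), prim_acc))
--     ps = path.split(';')
--     prev = ''
--     for n, el in enumerate(ps):
--         if not el:
--             continue
--         one_based = 1 + n
--         np = (prev, el)
--         prop_id = '{}/#{}'.format(prim_acc, one_based)
--         an.append((np, prop_id))
--         if prev:
--             prev = '{};{}'.format(prev, el)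
--         else:
--             prev = el
--     return an
-- ===== SOURCE B (Python) =====
-- def gen_all_namepaths(path, name, prim_acc):
--     while path.endswith(';'):
--         path = path[:-1]
--     an = []
--     if name:
--         if '(' in name:
--             name = name.split('(')[0].strip()
--         an.append(((path, name), prim_acc))
--     kept = [(i, el) for i, el in enumerate(path.split(';')) if el]
--     names = [el for _, el in kept]
--     for k, (i, el) in enumerate(kept):
--         an.append(((';'.join(names[:k]), el), '{}/#{}'.format(prim_acc, i + 1)))
--     return an
-- ===== Notes on version B (the rewrite author's own statement) =====
-- stated objective: alternative
-- what changed: A threads a growing `prev` string through the loop with an empty/non-empty branch; B pre-filters the non-empty indexed segments once and computes each prefix directly as ';'.join of a slice of the collected names, with no threaded string state or branch.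
import Mathlib
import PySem

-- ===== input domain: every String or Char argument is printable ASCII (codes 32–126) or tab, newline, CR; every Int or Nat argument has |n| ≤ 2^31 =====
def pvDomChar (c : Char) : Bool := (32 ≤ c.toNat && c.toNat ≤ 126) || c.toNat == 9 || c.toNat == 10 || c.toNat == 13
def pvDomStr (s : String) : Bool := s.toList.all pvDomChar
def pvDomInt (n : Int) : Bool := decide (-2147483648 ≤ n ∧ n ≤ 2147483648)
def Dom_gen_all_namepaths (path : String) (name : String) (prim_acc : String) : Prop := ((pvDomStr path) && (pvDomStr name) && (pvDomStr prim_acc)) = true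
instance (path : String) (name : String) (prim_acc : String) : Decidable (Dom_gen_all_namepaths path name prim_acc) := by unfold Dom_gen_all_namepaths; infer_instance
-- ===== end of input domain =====

-- B replaces A's threaded `prev` accumulator and its empty/non-empty branch by pre-filtering the
-- non-empty segments and computing each prefix directly as ';'.join of a slice (objective: alternative).

-- ===== PORT A =====
-- while path.endswith(';'): path = path[:-1]   (identical preamble in A and B)
def pvStripSemis (p : String) : String :=
  if h : PySem.Str.endswith p ";" = true then
    pvStripSemis (PySem.Str.slice p none (some (-1)))
  else p
termination_by p.toList.length
decreasing_by
  simp only [PySem.Str.endswith_eq] at h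
  have hne : p.toList ≠ [] := by
    rcases (PySem.Chars.endswith_iff _ _).mp h with ⟨t, ht⟩
    intro hnil; rw [hnil] at ht; simp at ht
  have hlen : 0 < p.toList.length := List.length_pos_of_ne_nil hne
  rw [PySem.Str.toList_slice, PySem.Chars.slice_eq_listSlice, PySem.List.slice_to_neg_one]
  have hdl : p.toList.dropLast.length = p.toList.length - 1 := List.length_dropLast
  omega

-- if '(' in name: name = name.split('(')[0].strip()   (identical preamble in A and B;
-- split with a non-empty separator never yields an empty list, so [0] is headD)
def pvFixName (name : String) : String :=
  if PySem.Str.isIn "(" name then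
    PySem.Str.strip (((PySem.Str.split? name "(").getD []).headD "")
  else name

-- the for-loop of A: threads `prev` and appends to `an`
def pvALoop (prim_acc : String) (l : List (Int × String)) (prev : String)
    (an : List ((String × String) × String)) : List ((String × String) × String) :=
  match l with
  | [] => an
  | (n, el) :: rest =>
    if el = "" then pvALoop prim_acc rest prev an
    else
      pvALoop prim_acc rest
        (if prev ≠ "" then prev ++ ";" ++ el else el)
        (an ++ [((prev, el), prim_acc ++ "/#" ++ PySem.Int.toStr (1 + n))])

def gen_all_namepaths (path : String) (name : String) (prim_acc : String) :
    List ((String × String) × String) :=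
  let path := pvStripSemis path
  let an : List ((String × String) × String) :=
    if name ≠ "" then [((path, pvFixName name), prim_acc)] else []
  let ps := (PySem.Str.split? path ";").getD []
  pvALoop prim_acc (PySem.List.enumerate ps 0) "" an

-- ===== PORT B =====
def gen_all_namepaths_alt (path : String) (name : String) (prim_acc : String) :
    List ((String × String) × String) :=
  let path := pvStripSemis path
  let an : List ((String × String) × String) :=
    if name ≠ "" then [((path, pvFixName name), prim_acc)] else []
  let ps := (PySem.Str.split? path ";").getD []
  let kept := (PySem.List.enumerate ps 0).filter (fun p => p.2 ≠ "")
  let names := kept.map (·.2)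
  an ++ (PySem.List.enumerate kept 0).map
    (fun q => ((PySem.Str.join ";" (PySem.List.slice names none (some q.1)), q.2.2),
               prim_acc ++ "/#" ++ PySem.Int.toStr (q.2.1 + 1)))

-- ===== PRECONDITION & SPEC =====
def Spec_gen_all_namepaths (path : String) (name : String) (prim_acc : String) (out : List ((String × String) × String)) : Prop := out = gen_all_namepaths_alt path name prim_acc
instance (path : String) (name : String) (prim_acc : String) (out : List ((String × String) × String)) : Decidable (Spec_gen_all_namepaths path name prim_acc out) := by unfold Spec_gen_all_namepaths; infer_instance

-- ===== CLAIM (what is proved, stated in full; the proofs are below) =====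
def Claim_equal_gen_all_namepaths : Prop := ∀ (path : String) (name : String) (prim_acc : String), Dom_gen_all_namepaths path name prim_acc → Spec_gen_all_namepaths path name prim_acc (gen_all_namepaths path name prim_acc)

-- ===== LEMMAS AND PROOFS =====

-- common form both loops are reduced to
def pvBListK (pa : String) (acc : List String) :
    List (Int × String) → List ((String × String) × String)
  | [] => []
  | (i, el) :: rest =>
      ((PySem.Str.join ";" acc, el), pa ++ "/#" ++ PySem.Int.toStr (i + 1)) ::
        pvBListK pa (acc ++ [el]) rest

theorem pv_join_nil : PySem.Str.join ";" [] = "" := by decide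

theorem pv_cjoin_snoc (ls : List (List Char)) (y : List Char) (h : ls ≠ []) :
    PySem.Chars.join [';'] (ls ++ [y]) = PySem.Chars.join [';'] ls ++ [';'] ++ y := by
  induction ls with
  | nil => exact absurd rfl h
  | cons a rest ih =>
    cases rest with
    | nil => simp [PySem.Chars.join_cons_cons, PySem.Chars.join_singleton]
    | cons b rest' =>
      have hih := ih (by simp)
      simp only [List.cons_append, PySem.Chars.join_cons_cons] at hih ⊢
      rw [hih]
      simp

theorem pv_cjoin_ne_nil (ls : List (List Char)) (h : ls ≠ [])
    (hne : ∀ x ∈ ls, x ≠ []) : PySem.Chars.join [';'] ls ≠ [] := by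
  cases ls with
  | nil => exact absurd rfl h
  | cons a rest =>
    cases rest with
    | nil =>
      rw [PySem.Chars.join_singleton]
      exact hne a (by simp)
    | cons b rest' =>
      rw [PySem.Chars.join_cons_cons]
      have ha : a ≠ [] := hne a (by simp)
      simp [ha]

theorem pv_join_singleton (s : String) : PySem.Str.join ";" [s] = s := by
  apply String.toList_inj.mp
  rw [PySem.Str.toList_join]
  simp [PySem.Chars.join_singleton]

theorem pv_join_snoc (acc : List String) (el : String) (h : acc ≠ []) :
    PySem.Str.join ";" (acc ++ [el]) = PySem.Str.join ";" acc ++ ";" ++ el := by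
  apply String.toList_inj.mp
  simp only [PySem.Str.toList_join, String.toList_append, List.map_append, List.map_cons,
    List.map_nil]
  have : (List.map String.toList acc) ≠ [] := by simpa using h
  have hsnoc := pv_cjoin_snoc (List.map String.toList acc) el.toList this
  simpa using hsnoc

theorem pv_join_ne_empty (acc : List String) (h : acc ≠ [])
    (hne : ∀ s ∈ acc, s ≠ "") : PySem.Str.join ";" acc ≠ "" := by
  intro hc
  have hc' : (PySem.Str.join ";" acc).toList = [] := by rw [hc]; rfl
  rw [PySem.Str.toList_join] at hc'
  refine pv_cjoin_ne_nil (List.map String.toList acc) (by simpa using h) ?_ (by simpa using hc')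
  intro x hx
  rcases List.mem_map.mp hx with ⟨s, hs, rfl⟩
  intro hxnil
  exact hne s hs (String.toList_inj.mp (by simpa using hxnil))

-- A's loop, with prev = join of the non-empty segments collected so far, is pvBListK of the filtered list
theorem pvALoop_eq (pa : String) (l : List (Int × String)) :
    ∀ (acc : List String) (an : List ((String × String) × String)),
      (∀ s ∈ acc, s ≠ "") →
      pvALoop pa l (PySem.Str.join ";" acc) an
        = an ++ pvBListK pa acc (l.filter (fun p => p.2 ≠ "")) := by
  induction l with
  | nil => intro acc an _; simp [pvALoop, pvBListK]
  | cons hd rest ih =>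
    intro acc an hacc
    obtain ⟨n, el⟩ := hd
    by_cases hel : el = ""
    · subst hel
      simp only [pvALoop, if_pos]
      rw [ih acc an hacc]
      simp
    · simp only [pvALoop, if_neg hel]
      have hprev : (if PySem.Str.join ";" acc ≠ "" then PySem.Str.join ";" acc ++ ";" ++ el
          else el) = PySem.Str.join ";" (acc ++ [el]) := by
        by_cases hacc0 : acc = []
        · subst hacc0
          simp [pv_join_nil, pv_join_singleton]
        · rw [if_pos (pv_join_ne_empty acc hacc0 hacc), pv_join_snoc acc el hacc0]
      rw [hprev, ih (acc ++ [el]) _ (by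
        intro s hs
        rcases List.mem_append.mp hs with h1 | h2
        · exact hacc s h1
        · simp at h2; subst h2; exact hel)]
      have hfil : (( (n, el) :: rest).filter (fun p => p.2 ≠ "")) =
          (n, el) :: rest.filter (fun p => p.2 ≠ "") := by
        simp [hel]
      rw [hfil]
      simp [pvBListK, Int.add_comm]

-- B's map over the enumerated kept list is pvBListK, prefixes taken from `names`
theorem pvBMap_eq (pa : String) (kept : List (Int × String)) :
    ∀ (j : Nat) (names : List String), names.drop j = kept.map (·.2) →
      (PySem.List.enumerate kept (j : Int)).map
        (fun q => ((PySem.Str.join ";" (PySem.List.slice names none (some q.1)), q.2.2),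
                   pa ++ "/#" ++ PySem.Int.toStr (q.2.1 + 1)))
        = pvBListK pa (names.take j) kept := by
  induction kept with
  | nil => intro j names _; simp [pvBListK, PySem.List.enumerate_nil]
  | cons hd rest ih =>
    intro j names hdrop
    obtain ⟨i, el⟩ := hd
    rw [PySem.List.enumerate_cons]
    simp only [List.map_cons]
    have hget : names[j]? = some el := by
      have : (names.drop j)[0]? = some el := by rw [hdrop]; simp
      simpa using this
    have htake : names.take (j + 1) = names.take j ++ [el] := by
      rw [List.take_add_one, hget]; rfl
    have hdrop' : names.drop (j + 1) = rest.map (·.2) := by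
      have : names.drop (j + 1) = (names.drop j).drop 1 := by
        rw [← List.drop_drop]
      rw [this, hdrop]; simp
    have hslice : PySem.List.slice names none (some (j : Int)) = names.take j :=
      PySem.List.slice_to_natCast names j
    have hcast : (j : Int) + 1 = ((j + 1 : Nat) : Int) := by push_cast; ring
    rw [hslice, hcast, ih (j + 1) names hdrop', htake]
    simp [pvBListK]

-- ===== VERDICT (by name: the statement is the Claim_ definition above) =====
theorem gen_all_namepaths_spec : Claim_equal_gen_all_namepaths := by
  intro path name prim_acc _
  unfold Spec_gen_all_namepaths gen_all_namepaths gen_all_namepaths_alt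
  have hA := pvALoop_eq prim_acc
    (PySem.List.enumerate ((PySem.Str.split? (pvStripSemis path) ";").getD []) 0)
    [] (if name ≠ "" then [((pvStripSemis path, pvFixName name), prim_acc)] else [])
    (by intro s hs; simp at hs)
  have hB := pvBMap_eq prim_acc
    ((PySem.List.enumerate ((PySem.Str.split? (pvStripSemis path) ";").getD []) 0).filter
      (fun p => p.2 ≠ ""))
    0
    (((PySem.List.enumerate ((PySem.Str.split? (pvStripSemis path) ";").getD []) 0).filter
      (fun p => p.2 ≠ "")).map (·.2))
    (by simp)
  simp only [List.take_zero, Nat.cast_zero] at hB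
  rw [pv_join_nil] at hA
  simp only []
  rw [hA, hB]
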